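-- pv_equiv track=rewrite | github.com/chyjuls/EDX_Python-Fundamentals | Unit3_PracticeTest2.py | product_code_check
-- ===== SOURCE A (Python) =====
-- def product_code_check(valid_string):
--     SpecialSym = "!@#$%&()-_[]{};':\",./<>?"
--     val = True
--
--     if len(valid_string) < 8:
--         return False
--
--     if not any(char.isdigit() for char in valid_string):
--         return False
--
--     if not any(char.isupper() for char in valid_string):
--         return False
--
--     if not any(char.islower() for char in valid_string):
--         return False
--     if any(char in " " for char in valid_string):
--         return False
--     if any(char in SpecialSym for char in valid_string):
--         return False
--
--     else:
--         return val
-- ===== SOURCE B (Python) =====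
-- def product_code_check(valid_string):
--     special = set("!@#$%&()-_[]{};':\",./<>?")
--     has_digit = has_upper = has_lower = has_space = has_special = False
--     for char in valid_string:
--         if char.isdigit():
--             has_digit = True
--         if char.isupper():
--             has_upper = True
--         if char.islower():
--             has_lower = True
--         if char == ' ':
--             has_space = True
--         if char in special:
--             has_special = True
--     return (len(valid_string) >= 8 and has_digit and has_upper and has_lower
--             and not has_space and not has_special)
-- ===== Notes on version B (the rewrite author's own statement) =====
-- stated objective: simpler
-- what changed: Replaced A's early-return chain of five separate full scans of the string by a single left-to-right pass that accumulates five boolean flags, followed by one conjunction.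
import Mathlib
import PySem

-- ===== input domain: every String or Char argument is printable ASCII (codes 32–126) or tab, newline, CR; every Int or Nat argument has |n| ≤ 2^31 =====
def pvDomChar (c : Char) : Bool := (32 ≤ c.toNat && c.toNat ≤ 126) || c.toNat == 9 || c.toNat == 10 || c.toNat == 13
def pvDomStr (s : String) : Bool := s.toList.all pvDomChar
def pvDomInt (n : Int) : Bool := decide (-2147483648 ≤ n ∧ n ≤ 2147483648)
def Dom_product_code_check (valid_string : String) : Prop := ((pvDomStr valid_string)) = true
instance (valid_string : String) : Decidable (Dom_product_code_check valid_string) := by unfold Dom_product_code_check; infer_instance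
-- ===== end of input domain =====

-- ===== PORT A =====
-- B: one accumulating pass with five boolean flags instead of A's chain of five separate scans (simpler decomposition).
def product_code_check (valid_string : String) : Bool :=
  let SpecialSym := "!@#$%&()-_[]{};':\",./<>?"
  let val := true
  if PySem.Str.len valid_string < 8 then false
  else if !(valid_string.toList.any (fun c => PySem.Chars.isdigit c)) then false
  else if !(valid_string.toList.any (fun c => PySem.Chars.isupper c)) then false
  else if !(valid_string.toList.any (fun c => PySem.Chars.islower c)) then false
  else if valid_string.toList.any (fun c => PySem.Chars.isIn [c] " ".toList) then false
  else if valid_string.toList.any (fun c => PySem.Chars.isIn [c] SpecialSym.toList) then false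
  else val

-- ===== PORT B =====
def product_code_check_alt (valid_string : String) : Bool :=
  let special := PySem.Set.ofList "!@#$%&()-_[]{};':\",./<>?".toList
  let st := valid_string.toList.foldl
    (fun (s : Bool × Bool × Bool × Bool × Bool) c =>
      (s.1 || PySem.Chars.isdigit c,
       s.2.1 || PySem.Chars.isupper c,
       s.2.2.1 || PySem.Chars.islower c,
       s.2.2.2.1 || (c == ' '),
       s.2.2.2.2 || special.contains c))
    (false, false, false, false, false)
  decide (8 ≤ PySem.Str.len valid_string) && st.1 && st.2.1 && st.2.2.1 && !st.2.2.2.1 && !st.2.2.2.2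

-- ===== PRECONDITION & SPEC =====
def Spec_product_code_check (valid_string : String) (out : Bool) : Prop := out = product_code_check_alt valid_string
instance (valid_string : String) (out : Bool) : Decidable (Spec_product_code_check valid_string out) := by unfold Spec_product_code_check; infer_instance

-- ===== CLAIM (what is proved, stated in full; the proofs are below) =====
def Claim_equal_product_code_check : Prop := ∀ (valid_string : String), Dom_product_code_check valid_string → Spec_product_code_check valid_string (product_code_check valid_string)

-- ===== LEMMAS AND PROOFS =====
-- single-char membership 'c in s' is list membership
lemma pv_isIn_singleton (c : Char) (s : List Char) : PySem.Chars.isIn [c] s = s.contains c := by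
  by_cases h : c ∈ s
  · simp [PySem.Chars.isIn_iff_infix, List.singleton_infix_iff, h]
  · simp [PySem.Chars.isIn_eq_false_iff, List.singleton_infix_iff, h]

-- B's five-flag fold, characterised by five `any`s
lemma pv_fold5 (sp : PySem.Set Char) (xs : List Char) (s : Bool × Bool × Bool × Bool × Bool) :
    xs.foldl (fun (s : Bool × Bool × Bool × Bool × Bool) c =>
      (s.1 || PySem.Chars.isdigit c,
       s.2.1 || PySem.Chars.isupper c,
       s.2.2.1 || PySem.Chars.islower c,
       s.2.2.2.1 || (c == ' '),
       s.2.2.2.2 || sp.contains c)) s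
    = (s.1 || xs.any (fun c => PySem.Chars.isdigit c),
       s.2.1 || xs.any (fun c => PySem.Chars.isupper c),
       s.2.2.1 || xs.any (fun c => PySem.Chars.islower c),
       s.2.2.2.1 || xs.any (fun c => c == ' '),
       s.2.2.2.2 || xs.any (fun c => sp.contains c)) := by
  induction xs generalizing s with
  | nil => simp
  | cons x xs ih => rw [List.foldl_cons, ih]; simp [Bool.or_assoc]

-- ===== VERDICT (by name: the statement is the Claim_ definition above) =====
theorem product_code_check_spec : Claim_equal_product_code_check := by
  intro s _
  unfold Spec_product_code_check product_code_check product_code_check_alt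
  simp only [pv_fold5, Bool.false_or, pv_isIn_singleton]
  have hcontains : ∀ c : Char,
      (PySem.Set.ofList "!@#$%&()-_[]{};':\",./<>?".toList).contains c
      = ("!@#$%&()-_[]{};':\",./<>?".toList).contains c := by
    intro c; simp [pysem]
  have hsp : ∀ c : Char, (" ".toList.contains c) = (c == ' ') := by
    intro c; cases h : c == ' ' <;> simp_all
  simp only [hcontains, hsp]
  generalize PySem.Str.len s = n
  generalize s.toList.any (fun c => PySem.Chars.isdigit c) = d
  generalize s.toList.any (fun c => PySem.Chars.isupper c) = u
  generalize s.toList.any (fun c => PySem.Chars.islower c) = l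
  generalize s.toList.any (fun c => c == ' ') = sp
  generalize s.toList.any (fun c => ("!@#$%&()-_[]{};':\",./<>?".toList).contains c) = sc
  rcases lt_or_ge n 8 with h8 | h8
  · rw [if_pos h8]
    simp [show ¬ (8 ≤ n) by omega]
  · rw [if_neg (by omega)]
    cases d <;> cases u <;> cases l <;> cases sp <;> cases sc <;>
      simp [show (8 : Int) ≤ n from h8]
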